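-- pv_equiv track=rewrite | github.com/olixToKozak/prg-basics | 04-Functions/asterisks.py | f
-- ===== SOURCE A (Python) =====
-- def f(n):
--     ast = ''
--     if n<=1:
--         return n*'*'
--     else:
--         for i in range(n):
--             if i < n-1:
--                 ast = ast + '*/'
--             else:
--                 ast = ast + '*'
--         return ast
-- ===== SOURCE B (Python) =====
-- def f(n):
--     return '/'.join('*' * n)
-- ===== Notes on version B (the rewrite author's own statement) =====
-- stated objective: idiomatic
-- what changed: The per-iteration branch ('*/' vs '*') and the quadratic string accumulator are replaced by a single declarative '/'.join over the string '*'*n; no loop, no conditional, no accumulator.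
import Mathlib
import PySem

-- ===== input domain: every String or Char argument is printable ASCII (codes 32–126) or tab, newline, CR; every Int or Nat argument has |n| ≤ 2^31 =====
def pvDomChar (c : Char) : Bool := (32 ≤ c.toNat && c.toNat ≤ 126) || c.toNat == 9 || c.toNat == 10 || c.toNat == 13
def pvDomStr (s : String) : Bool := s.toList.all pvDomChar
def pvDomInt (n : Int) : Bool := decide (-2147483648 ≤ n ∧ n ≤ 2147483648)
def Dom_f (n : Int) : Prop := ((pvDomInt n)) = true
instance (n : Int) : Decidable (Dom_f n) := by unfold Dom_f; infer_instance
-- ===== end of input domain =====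

-- B replaces A's branch-in-a-loop accumulator with a single '/'.join over '*'*n (idiomatic; return value only).
-- ===== PORT A =====
def f (n : Int) : String :=
  if n ≤ 1 then
    String.mk (PySem.List.pyRepeat ['*'] n)
  else
    String.mk ((PySem.List.pyRange 0 n 1).foldl
      (fun ast i => if i < n - 1 then ast ++ ['*', '/'] else ast ++ ['*']) [])

-- ===== PORT B =====
def f_alt (n : Int) : String :=
  String.mk (PySem.Chars.join ['/'] ((List.replicate n.toNat '*').map (fun c => [c])))

-- ===== PRECONDITION & SPEC =====
def Spec_f (n : Int) (out : String) : Prop := out = f_alt n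
instance (n : Int) (out : String) : Decidable (Spec_f n out) := by unfold Spec_f; infer_instance

-- ===== CLAIM (what is proved, stated in full; the proofs are below) =====
def Claim_equal_f : Prop := ∀ (n : Int), Dom_f n → Spec_f n (f n)

-- ===== LEMMAS AND PROOFS =====

-- '/'.join of m+1 singleton '*' strings, in closed form
theorem join_replicate_star (m : Nat) :
    PySem.Chars.join ['/'] ((List.replicate (m + 1) '*').map (fun c => [c]))
      = (List.replicate m (['*', '/'] : List Char)).flatten ++ ['*'] := by
  induction m with
  | zero => simp [PySem.Chars.join_singleton]
  | succ k ih =>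
      rw [List.replicate_succ, List.map_cons]
      have h2 : (List.replicate (k + 1) '*').map (fun c => [c])
          = ['*'] :: (List.replicate k '*').map (fun c => [c]) := by
        rw [List.replicate_succ, List.map_cons]
      rw [h2, PySem.Chars.join_cons_cons, ← h2, ih]
      simp [List.replicate_succ]

-- a constant flatMap only depends on the length
theorem flatMap_const {α β : Type} (c : List β) (l : List α) :
    l.flatMap (fun _ => c) = (List.replicate l.length c).flatten := by
  induction l with
  | nil => simp
  | cons x xs ih => simp [List.flatMap_cons, ih, List.replicate_succ]

-- ===== VERDICT (by name: the statement is the Claim_ definition above) =====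
theorem f_spec : Claim_equal_f := by
  intro n _
  show f n = f_alt n
  unfold f f_alt
  by_cases h1 : n ≤ 1
  · rw [if_pos h1, PySem.List.pyRepeat_singleton]
    by_cases h0 : n ≤ 0
    · have : n.toNat = 0 := Int.toNat_of_nonpos h0
      simp [this, PySem.Chars.join, List.intercalate]
    · have : n = 1 := by omega
      subst this
      simp [PySem.Chars.join_singleton]
  · rw [if_neg h1]
    have hn : 2 ≤ n := by omega
    -- split off the last iteration
    have hsplit : PySem.List.pyRange 0 n 1
        = PySem.List.pyRange 0 (n - 1) 1 ++ [n - 1] := by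
      have := PySem.List.pyRange_one_succ_right (a := 0) (b := n - 1) (by omega)
      simpa [show n - 1 + 1 = n by ring] using this
    rw [hsplit, List.foldl_append]
    -- on the initial segment the branch always takes '*/'
    have hbody : (PySem.List.pyRange 0 (n - 1) 1).foldl
        (fun ast i => if i < n - 1 then ast ++ ['*', '/'] else ast ++ ['*']) []
        = (List.replicate (n - 1).toNat (['*', '/'] : List Char)).flatten := by
      rw [PySem.List.foldl_congr_mem _ _ (fun ast _ => ast ++ ['*', '/']) []
        (by
          intro acc x hx
          have := (PySem.List.mem_pyRange_one).1 hx
          rw [if_pos (by omega)])]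
      rw [PySem.List.foldl_append_eq_flatMap (fun _ => (['*', '/'] : List Char))]
      rw [flatMap_const]
      simp [PySem.List.length_pyRange_one]
    rw [hbody]
    simp only [List.foldl_cons, List.foldl_nil, if_neg (lt_irrefl (n - 1))]
    have hm : n.toNat = (n - 1).toNat + 1 := by omega
    rw [hm, join_replicate_star]
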